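-- pv_equiv track=rewrite | github.com/aweers/lectern | src/lectern/build.py | clean_latex
-- ===== SOURCE A (Python) =====
-- def clean_latex(text: str) -> str:
--     """Clean LaTeX formatting from text."""
--     text = text.replace("{", "").replace("}", "")
--     replacements = {
--         '\\"u': "ü",
--         '\\"o': "ö",
--         '\\"a': "ä",
--         '\\"U': "Ü",
--         '\\"O': "Ö",
--         '\\"A': "Ä",
--         "\\'e": "é",
--         "\\'a": "á",
--         "\\ss": "ß",
--     }
--     for latex, char in replacements.items():
--         text = text.replace(latex, char)
--     return text
-- ===== SOURCE B (Python) =====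
-- def clean_latex(text: str) -> str:
--     """Clean LaTeX formatting from text."""
--     text = text.replace("{", "").replace("}", "")
--     replacements = {
--         '\\"u': "ü",
--         '\\"o': "ö",
--         '\\"a': "ä",
--         '\\"U': "Ü",
--         '\\"O': "Ö",
--         '\\"A': "Ä",
--         "\\'e": "é",
--         "\\'a": "á",
--         "\\ss": "ß",
--     }
--     out = []
--     i = 0
--     n = len(text)
--     while i < n:
--         rep = replacements.get(text[i:i + 3])
--         if rep is not None:
--             out.append(rep)
--             i += 3
--         else:
--             out.append(text[i])
--             i += 1
--     return "".join(out)
-- ===== Notes on version B (the rewrite author's own statement) =====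
-- stated objective: alternative
-- what changed: After the same brace-stripping step, the nine sequential whole-string .replace passes are replaced by one left-to-right scan that checks the 3-character window text[i:i+3] against the replacement dict and advances by 3 on a hit, 1 otherwise.
import Mathlib
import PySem

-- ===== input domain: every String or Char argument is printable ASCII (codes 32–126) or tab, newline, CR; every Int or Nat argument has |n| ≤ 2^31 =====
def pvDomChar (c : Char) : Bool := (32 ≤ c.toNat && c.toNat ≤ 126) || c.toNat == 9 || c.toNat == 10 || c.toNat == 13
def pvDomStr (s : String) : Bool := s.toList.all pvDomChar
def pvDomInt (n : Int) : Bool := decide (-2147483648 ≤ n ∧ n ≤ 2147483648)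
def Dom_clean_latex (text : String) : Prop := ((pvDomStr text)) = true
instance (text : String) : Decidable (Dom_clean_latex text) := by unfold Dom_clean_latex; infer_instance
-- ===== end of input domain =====

-- B replaces A's nine sequential whole-string .replace passes by one left-to-right
-- 3-character-window scan over the brace-stripped text (objective: alternative).

-- ===== PORT A =====
def clean_latex (text : String) : String :=
  let t := PySem.Str.replace (PySem.Str.replace text "{" "") "}" ""
  let replacements : List (String × String) :=
    [("\\\"u", "ü"), ("\\\"o", "ö"), ("\\\"a", "ä"), ("\\\"U", "Ü"), ("\\\"O", "Ö"),
     ("\\\"A", "Ä"), ("\\'e", "é"), ("\\'a", "á"), ("\\ss", "ß")]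
  replacements.foldl (fun t p => PySem.Str.replace t p.1 p.2) t

-- ===== PORT B =====
-- Source B's dict, on the Chars side: keys are the 3-char windows text[i:i+3] as List Char,
-- values the single replacement characters (Source B's one-char value strings).
def pvReplDict : PySem.Dict (List Char) Char :=
  PySem.Dict.mk
    [(['\\', '"', 'u'], 'ü'), (['\\', '"', 'o'], 'ö'), (['\\', '"', 'a'], 'ä'),
     (['\\', '"', 'U'], 'Ü'), (['\\', '"', 'O'], 'Ö'), (['\\', '"', 'A'], 'Ä'),
     (['\\', '\'', 'e'], 'é'), (['\\', '\'', 'a'], 'á'), (['\\', 's', 's'], 'ß')]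

-- Source B's while loop: window text[i:i+3] = take 3, hit advances i by 3, miss by 1;
-- out is the list of emitted characters ("".join(out) = String.mk at the end).
def pvScan (l : List Char) : List Char :=
  match l with
  | [] => []
  | c :: t =>
    match pvReplDict.get? ((c :: t).take 3) with
    | some r => r :: pvScan (t.drop 2)
    | none => c :: pvScan t
termination_by l.length
decreasing_by
  · simp only [List.length_drop, List.length_cons]; omega
  · simp

def clean_latex_alt (text : String) : String :=
  let t := PySem.Str.replace (PySem.Str.replace text "{" "") "}" ""
  String.mk (pvScan t.toList)

-- ===== PRECONDITION & SPEC =====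
def Spec_clean_latex (text : String) (out : String) : Prop := out = clean_latex_alt text
instance (text : String) (out : String) : Decidable (Spec_clean_latex text out) := by unfold Spec_clean_latex; infer_instance

-- ===== CLAIM (what is proved, stated in full; the proofs are below) =====
def Claim_equal_clean_latex : Prop := ∀ (text : String), Dom_clean_latex text → Spec_clean_latex text (clean_latex text)

-- ===== LEMMAS AND PROOFS =====

-- Simple structural form of Python str.replace (for a nonempty pattern).
def repl1 (old new : List Char) : List Char → List Char
  | [] => []
  | c :: t =>
    if 0 < old.length ∧ old.isPrefixOf (c :: t) then
      new ++ repl1 old new (t.drop (old.length - 1))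
    else
      c :: repl1 old new t
termination_by l => l.length
decreasing_by
  · simp only [List.length_drop, List.length_cons]; omega
  · simp

lemma replace_go_eq (old new : List Char) (h : old ≠ []) :
    ∀ fuel l acc, l.length ≤ fuel →
      PySem.Chars.replace.go old new fuel l acc = acc.reverse ++ repl1 old new l := by
  intro fuel
  induction fuel with
  | zero =>
    intro l acc hl
    have : l = [] := by
      cases l with
      | nil => rfl
      | cons c t => simp at hl
    subst this
    simp [PySem.Chars.replace.go, repl1]
  | succ n ih =>
    intro l acc hl
    cases l with
    | nil => simp [PySem.Chars.replace.go, repl1]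
    | cons c t =>
      by_cases hp : old.isPrefixOf (c :: t)
      · have hlen : 0 < old.length := by cases old with
          | nil => exact absurd rfl h
          | cons a b => simp
        have hd : (c :: t).drop old.length = t.drop (old.length - 1) := by
          cases old with
          | nil => exact absurd rfl h
          | cons a b => simp
        rw [PySem.Chars.replace.go]
        simp only [hp, if_pos]
        rw [ih ((c :: t).drop old.length) _ (by
          simp only [List.length_drop, List.length_cons]
          simp only [List.length_cons] at hl
          omega)]
        rw [repl1]
        simp [hp, hlen, hd]
  -- note: the `go` equation for succ needs hp to select the branch
      · rw [PySem.Chars.replace.go]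
        simp only [hp]
        rw [ih t (c :: acc) (by simp at hl ⊢; omega)]
        rw [repl1]
        simp [hp]

lemma chars_replace_eq (old new s : List Char) (h : old ≠ []) :
    PySem.Chars.replace s old new = repl1 old new s := by
  rw [PySem.Chars.replace]
  simp only [List.isEmpty_iff, h, if_false]
  have := replace_go_eq old new h s.length s [] le_rfl
  simpa using this

-- pvScan generalized over the table (proof device).
def scanT (T : List (List Char × Char)) : List Char → List Char
  | [] => []
  | c :: t =>
    match (PySem.Dict.mk T).get? ((c :: t).take 3) with
    | some r => r :: scanT T (t.drop 2)
    | none => c :: scanT T t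
termination_by l => l.length
decreasing_by
  · simp only [List.length_drop, List.length_cons]; omega
  · simp

lemma pvScan_eq_scanT : ∀ l, pvScan l = scanT pvReplDict.items l := by
  intro l
  induction l using pvScan.induct with
  | case1 => rw [pvScan, scanT]
  | case2 c t r hr ih =>
    rw [pvScan, scanT]
    have : PySem.Dict.mk pvReplDict.items = pvReplDict := rfl
    rw [this, hr, ih]
  | case3 c t hr ih =>
    rw [pvScan, scanT]
    have : PySem.Dict.mk pvReplDict.items = pvReplDict := rfl
    rw [this, hr, ih]

lemma scanT_nil : ∀ l, scanT [] l = l := by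
  intro l
  induction l with
  | nil => rw [scanT]
  | cons c t ih =>
    rw [scanT]
    simp [PySem.Dict.get?, ih]

-- the shape every key of the table has
def KeyOK (ks : List Char) : Prop := ∃ x y, ks = ['\\', x, y] ∧ x ≠ '\\' ∧ y ≠ '\\'

lemma repl1_cons_not_prefix {k : List Char} {v : Char} {c : Char} {t : List Char}
    (h : ¬ k <+: (c :: t)) : repl1 k [v] (c :: t) = c :: repl1 k [v] t := by
  rw [repl1]
  have : ¬ (0 < k.length ∧ k.isPrefixOf (c :: t)) := by
    rintro ⟨-, hp⟩
    exact h (List.isPrefixOf_iff_prefix.mp hp)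
  rw [if_neg this]

lemma repl1_match {x y z v : Char} {t : List Char} :
    repl1 [x, y, z] [v] (x :: y :: z :: t) = v :: repl1 [x, y, z] [v] t := by
  rw [repl1]
  have hp : List.isPrefixOf [x, y, z] (x :: y :: z :: t) = true := by
    simp
  simp [hp]

-- a key never matches a position whose head is not '\' ; two skip steps at once
lemma repl1_skip2 {k : List Char} (hk : KeyOK k) {v b c : Char} {t : List Char}
    (hb : b ≠ '\\') (hc : c ≠ '\\') :
    repl1 k [v] (b :: c :: t) = b :: c :: repl1 k [v] t := by
  obtain ⟨x, y, hkeq, -, -⟩ := hk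
  subst hkeq
  rw [repl1_cons_not_prefix (by
    intro hpre
    exact hb (List.cons_prefix_cons.mp hpre).1.symm)]
  rw [repl1_cons_not_prefix (by
    intro hpre
    exact hc (List.cons_prefix_cons.mp hpre).1.symm)]

-- a prefix of repl1's output whose chars avoid v was already a prefix of the input
lemma prefix_of_repl1 {k : List Char} {v : Char} :
    ∀ (l k' : List Char), k' ≠ [] → v ∉ k' → k' <+: repl1 k [v] l → k' <+: l := by
  intro l
  induction l using repl1.induct k with
  | case1 =>
    intro k' hne _ hp
    rw [repl1] at hp
    exact absurd (List.prefix_nil.mp hp) hne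
  | case2 c t hcond ih =>
    intro k' hne hv hp
    rw [repl1, if_pos hcond] at hp
    cases k' with
    | nil => exact absurd rfl hne
    | cons a k'' =>
      have := (List.cons_prefix_cons.mp hp).1
      simp [this] at hv
  | case3 c t hcond ih =>
    intro k' hne hv hp
    rw [repl1, if_neg hcond] at hp
    cases k' with
    | nil => exact absurd rfl hne
    | cons a k'' =>
      obtain ⟨ha, hk''⟩ := List.cons_prefix_cons.mp hp
      subst ha
      cases k'' with
      | nil => simp
      | cons b k₃ =>
        have : (b :: k₃) <+: t :=
          ih (b :: k₃) (by simp) (by intro hm; exact hv (List.mem_cons_of_mem _ hm)) hk''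
        exact List.cons_prefix_cons.mpr ⟨rfl, this⟩

-- prefix by a table key is unaffected by repl1 (both directions)
lemma prefix_repl1_iff {k k' : List Char} {v c : Char} {t : List Char}
    (hk' : KeyOK k') (hk : KeyOK k) (hvk' : v ∉ k') :
    (k' <+: c :: repl1 k [v] t ↔ k' <+: c :: t) := by
  constructor
  · intro hp
    obtain ⟨x, y, hkeq, -, -⟩ := hk'
    subst hkeq
    obtain ⟨hc, htail⟩ := List.cons_prefix_cons.mp hp
    subst hc
    refine List.cons_prefix_cons.mpr ⟨rfl, ?_⟩
    exact prefix_of_repl1 t [x, y] (by simp)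
      (by intro hm; exact hvk' (by simp at hm ⊢; tauto)) htail
  · intro hp
    obtain ⟨x, y, hkeq, hx, hy⟩ := hk'
    subst hkeq
    obtain ⟨hc, htail⟩ := List.cons_prefix_cons.mp hp
    subst hc
    obtain ⟨t₂, ht⟩ := htail
    obtain ⟨t₂', ht₂⟩ : ∃ t', t = x :: y :: t' := ⟨t₂, by simpa using ht.symm⟩
    subst ht₂
    rw [repl1_skip2 hk hx hy]
    exact List.cons_prefix_cons.mpr ⟨rfl, List.cons_prefix_cons.mpr ⟨rfl, List.cons_prefix_cons.mpr ⟨rfl, List.nil_prefix⟩⟩⟩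

-- a length-3 key is a prefix iff it equals the 3-char window
lemma prefix_iff_take3 {k' l : List Char} (h3 : k'.length = 3) : k' <+: l ↔ l.take 3 = k' := by
  rw [List.prefix_iff_eq_take, h3]
  exact comm

lemma get?_mk_eq_none {T : List (List Char × Char)} {q : List Char}
    (h : ∀ p ∈ T, p.1 ≠ q) : (PySem.Dict.mk T).get? q = none := by
  induction T with
  | nil => simp [PySem.Dict.get?]
  | cons p T' ih =>
    rw [PySem.Dict.get?_mk_cons]
    have : (p.1 == q) = false := by
      simp only [beq_eq_false_iff_ne]
      exact h p (by simp)
    simp only [this, if_false, Bool.false_eq_true]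
    exact ih (fun p hp => h p (List.mem_cons_of_mem _ hp))

lemma get?_mk_eq_some_mem {T : List (List Char × Char)} {q : List Char} {r : Char}
    (h : (PySem.Dict.mk T).get? q = some r) : ∃ p ∈ T, p.1 = q := by
  simp only [PySem.Dict.get?, Option.map_eq_some_iff] at h
  obtain ⟨p, hp, -⟩ := h
  exact ⟨p, List.mem_of_find?_eq_some hp, by simpa using List.find?_some hp⟩

-- lookup is unaffected by repl1 on the tail
lemma get?_take3_repl1 {T : List (List Char × Char)} {k : List Char} {v c : Char} {t : List Char}
    (hT : ∀ p ∈ T, KeyOK p.1) (hvT : ∀ p ∈ T, v ∉ p.1) (hk : KeyOK k) :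
    (PySem.Dict.mk T).get? ((c :: repl1 k [v] t).take 3) =
      (PySem.Dict.mk T).get? ((c :: t).take 3) := by
  induction T with
  | nil => simp [PySem.Dict.get?]
  | cons p T' ih =>
    rw [PySem.Dict.get?_mk_cons, PySem.Dict.get?_mk_cons]
    have h3 : p.1.length = 3 := by
      obtain ⟨x, y, he, -, -⟩ := hT p (by simp); simp [he]
    have : (p.1 == (c :: repl1 k [v] t).take 3) = (p.1 == (c :: t).take 3) := by
      rw [Bool.eq_iff_iff]
      simp only [beq_iff_eq]
      rw [eq_comm, ← prefix_iff_take3 h3, eq_comm, ← prefix_iff_take3 h3]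
      exact prefix_repl1_iff (hT p (by simp)) hk (hvT p (by simp))
    rw [this]
    rcases hbe : (p.1 == (c :: t).take 3) with _ | _
    · simp only [Bool.false_eq_true, if_false]
      exact ih (fun p hp => hT p (List.mem_cons_of_mem _ hp))
        (fun p hp => hvT p (List.mem_cons_of_mem _ hp))
    · simp

-- THE inner lemma: one repl1 pass before a multi-key scan = the scan with that key added in front
lemma scan_repl1 (k : List Char) (v : Char) (T : List (List Char × Char))
    (hk : KeyOK k) (hT : ∀ p ∈ T, KeyOK p.1) (hvT : ∀ p ∈ T, v ∉ p.1) (hv : v ≠ '\\') :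
    ∀ l, scanT T (repl1 k [v] l) = scanT ((k, v) :: T) l := by
  obtain ⟨x, y, hkeq, hx, hy⟩ := hk
  subst hkeq
  have main : ∀ n (l : List Char), l.length ≤ n →
      scanT T (repl1 ['\\', x, y] [v] l) = scanT ((['\\', x, y], v) :: T) l := by
    intro n
    induction n with
    | zero =>
      intro l hl
      have hnil : l = [] := by cases l with
        | nil => rfl
        | cons c t => simp at hl
      subst hnil
      simp [repl1, scanT]
    | succ n ih =>
      intro l hl
      cases l with
      | nil => simp [repl1, scanT]
      | cons c t =>
        by_cases hpre : ['\\', x, y] <+: c :: t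
        · -- the new key matches at the head
          obtain ⟨t₂, ht⟩ := hpre
          simp only [List.cons_append, List.nil_append, List.cons.injEq] at ht
          obtain ⟨hc, hteq⟩ := ht
          subst hc; subst hteq
          rw [repl1_match]
          have hnone : (PySem.Dict.mk T).get?
              ((v :: repl1 ['\\', x, y] [v] t₂).take 3) = none := by
            apply get?_mk_eq_none
            intro p hp he
            obtain ⟨x', y', hpe, -, -⟩ := hT p hp
            rw [hpe] at he
            simp only [List.take_succ_cons, List.cons.injEq] at he
            exact hv he.1.symm
          conv_lhs => rw [scanT]
          simp only [hnone]
          rw [ih t₂ (by simp at hl; omega)]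
          have hsome : (PySem.Dict.mk ((['\\', x, y], v) :: T)).get?
              (('\\' :: x :: y :: t₂).take 3) = some v := by
            rw [PySem.Dict.get?_mk_cons]; simp
          conv_rhs => rw [scanT]
          simp only [hsome, List.drop_succ_cons, List.drop_zero]
        · -- the new key does not match at the head
          rw [repl1_cons_not_prefix hpre]
          have hk' : KeyOK ['\\', x, y] := ⟨x, y, rfl, hx, hy⟩
          conv_lhs => rw [scanT]
          rw [get?_take3_repl1 hT hvT hk']
          have hkne : ((['\\', x, y] : List Char) == (c :: t).take 3) = false := by
            simp only [beq_eq_false_iff_ne]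
            intro he
            exact hpre ((prefix_iff_take3 (by simp)).mpr he.symm)
          rcases hget : (PySem.Dict.mk T).get? ((c :: t).take 3) with _ | r
          · -- no table key matches either
            rw [ih t (by simp at hl; omega)]
            have hnone : (PySem.Dict.mk ((['\\', x, y], v) :: T)).get?
                ((c :: t).take 3) = none := by
              rw [PySem.Dict.get?_mk_cons, hget]
              simp only [hkne, Bool.false_eq_true, if_false]
            conv_rhs => rw [scanT]
            simp only [hnone]
          · -- a table key matches
            obtain ⟨p, hpT, hp1⟩ := get?_mk_eq_some_mem hget
            obtain ⟨x', y', hpe, hx', hy'⟩ := hT p hpT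
            have hpre' : p.1 <+: c :: t := (prefix_iff_take3 (by simp [hpe])).mpr hp1.symm
            rw [hpe] at hpre'
            obtain ⟨t₂, ht⟩ := hpre'
            simp only [List.cons_append, List.nil_append, List.cons.injEq] at ht
            obtain ⟨hc, hteq⟩ := ht
            subst hc; subst hteq
            rw [repl1_skip2 hk' hx' hy']
            simp only [List.drop_succ_cons, List.drop_zero]
            rw [ih t₂ (by simp at hl; omega)]
            have hsome : (PySem.Dict.mk ((['\\', x, y], v) :: T)).get?
                (('\\' :: x' :: y' :: t₂).take 3) = some r := by
              rw [PySem.Dict.get?_mk_cons, hget]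
              simp only [hkne, Bool.false_eq_true, if_false]
            conv_rhs => rw [scanT]
            simp only [hsome, List.drop_succ_cons, List.drop_zero]
  intro l; exact main l.length l le_rfl

-- table conditions making the nine passes independent
def GoodT (T : List (List Char × Char)) : Prop :=
  (∀ p ∈ T, KeyOK p.1) ∧ (∀ p ∈ T, p.2 ≠ '\\' ∧ ∀ q ∈ T, p.2 ∉ q.1)

lemma fold_eq_scanT : ∀ (T : List (List Char × Char)), GoodT T →
    ∀ l, T.foldl (fun s p => repl1 p.1 [p.2] s) l = scanT T l := by
  intro T
  induction T with
  | nil => intro _ l; simpa using (scanT_nil l).symm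
  | cons p T' ih =>
    rintro ⟨hkeys, hvals⟩ l
    obtain ⟨k, v⟩ := p
    rw [List.foldl_cons]
    rw [ih ⟨fun q hq => hkeys q (List.mem_cons_of_mem _ hq),
        fun q hq => ⟨(hvals q (List.mem_cons_of_mem _ hq)).1,
          fun r hr => (hvals q (List.mem_cons_of_mem _ hq)).2 r (List.mem_cons_of_mem _ hr)⟩⟩]
    exact scan_repl1 k v T' (hkeys (k, v) (by simp))
      (fun q hq => hkeys q (List.mem_cons_of_mem _ hq))
      (fun q hq => (hvals (k, v) (by simp)).2 q (List.mem_cons_of_mem _ hq))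
      (hvals (k, v) (by simp)).1 l

def table9 : List (List Char × Char) :=
  [(['\\', '"', 'u'], 'ü'), (['\\', '"', 'o'], 'ö'), (['\\', '"', 'a'], 'ä'),
   (['\\', '"', 'U'], 'Ü'), (['\\', '"', 'O'], 'Ö'), (['\\', '"', 'A'], 'Ä'),
   (['\\', '\'', 'e'], 'é'), (['\\', '\'', 'a'], 'á'), (['\\', 's', 's'], 'ß')]

lemma good_table9 : GoodT table9 := by
  constructor
  · intro p hp
    fin_cases hp <;> exact ⟨_, _, rfl, by decide, by decide⟩
  · intro p hp
    fin_cases hp <;> refine ⟨by decide, ?_⟩ <;> intro q hq <;> fin_cases hq <;> decide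

-- ===== VERDICT (by name: the statement is the Claim_ definition above) =====
theorem clean_latex_spec : Claim_equal_clean_latex := by
  intro text _
  unfold Spec_clean_latex clean_latex clean_latex_alt
  apply String.toList_inj.mp
  simp only [List.foldl, PySem.Str.toList_replace]
  rw [chars_replace_eq _ _ _ (by decide), chars_replace_eq _ _ _ (by decide),
      chars_replace_eq _ _ _ (by decide), chars_replace_eq _ _ _ (by decide),
      chars_replace_eq _ _ _ (by decide), chars_replace_eq _ _ _ (by decide),
      chars_replace_eq _ _ _ (by decide), chars_replace_eq _ _ _ (by decide),
      chars_replace_eq _ _ _ (by decide)]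
  have hmk : ∀ l : List Char, (String.mk l).toList = l :=
    fun l => Eq.symm (String.ofList_eq.mp rfl)
  rw [hmk, pvScan_eq_scanT]
  have hitems : pvReplDict.items = table9 := rfl
  rw [hitems]
  rw [← fold_eq_scanT table9 good_table9]
  simp only [table9, List.foldl]
  rfl
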